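-- pv_equiv track=rewrite | github.com/jeslinmx/advent2020 | 17.py | evolve
-- ===== SOURCE A (Python) =====
-- from operator import add
-- from itertools import product
-- from collections import defaultdict
--
-- def evolve(points, timesteps):
--     if timesteps <= 0:
--         return points
--     nearby_active = defaultdict(int)
--     for point in points:
--         for offset in product([-1, 0, 1], repeat=len(point)):
--             nearby_active[tuple(map(add, point, offset))] += 1
--     # the evolution rules can be restated, in terms of nearby cubes (including
--     # the target cube), as follows:
--     # 1. cubes which have 3 nearby active cubes will be active, and
--     # 2. currently active cubes which have 4 nearby active cubes will be active
--     next_state = [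
--         point
--         for point, nearby in nearby_active.items()
--         if nearby == 3 or (point in points and nearby == 4)
--     ]
--     return evolve(next_state, timesteps - 1)
-- ===== SOURCE B (Python) =====
-- from operator import add
-- from itertools import product
--
-- def evolve(points, timesteps):
--     if timesteps <= 0:
--         return points
--     state = points
--     for _ in range(timesteps):
--         counts = {}
--         for point in state:
--             for offset in product([-1, 0, 1], repeat=len(point)):
--                 key = tuple(map(add, point, offset))
--                 counts[key] = counts.get(key, 0) + 1
--         state = [
--             point
--             for point, nearby in counts.items()
--             if nearby == 3 or (point in state and nearby == 4)
--         ]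
--     return state
-- ===== Notes on version B (the rewrite author's own statement) =====
-- stated objective: idiomatic
-- what changed: The tail recursion of A is replaced by an explicit iterative for-loop over a state variable, and the defaultdict is replaced by a plain dict with get(key, 0) + 1; the per-step scatter count and selection comprehension keep the same order, so the result is identical (including the first-step point-in-state test comparing tuples against the caller's lists).
-- outside the precondition, e.g. on evolve([(0,)], 950): A returns [], B returns []
import Mathlib
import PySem

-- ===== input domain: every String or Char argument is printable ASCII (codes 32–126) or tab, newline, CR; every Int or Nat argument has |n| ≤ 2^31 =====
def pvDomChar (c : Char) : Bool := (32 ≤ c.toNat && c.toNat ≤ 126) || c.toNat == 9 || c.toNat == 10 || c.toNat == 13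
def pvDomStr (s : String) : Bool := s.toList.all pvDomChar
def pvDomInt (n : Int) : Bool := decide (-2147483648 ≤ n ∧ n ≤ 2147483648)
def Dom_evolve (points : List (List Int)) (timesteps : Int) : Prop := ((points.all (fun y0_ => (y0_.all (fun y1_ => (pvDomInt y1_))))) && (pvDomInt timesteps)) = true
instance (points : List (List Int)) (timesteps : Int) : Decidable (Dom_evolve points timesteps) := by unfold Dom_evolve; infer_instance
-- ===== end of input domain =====

-- B replaces A's tail recursion by an explicit iterative loop with a plain dict (get(key,0)+1)
-- instead of a defaultdict; same per-step counting and selection order, identical results (idiomatic rewrite).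


-- ===== PORT A =====
-- itertools.product([-1, 0, 1], repeat=n), in CPython's order (leftmost position varies slowest)
def pyOffsets : Nat → List (List Int)
  | 0 => [[]]
  | n + 1 => ([-1, 0, 1] : List Int).flatMap (fun d => (pyOffsets n).map (d :: ·))

-- the defaultdict(int) scatter loop: for point in points: for offset in …: nearby_active[point+offset] += 1
def nearbyActiveA (points : List (List Int)) : PySem.Dict (List Int) Int :=
  points.foldl
    (fun d point =>
      (pyOffsets point.length).foldl
        (fun d offset => d.modify (List.zipWith (· + ·) point offset) 0 (· + 1)) d)
    PySem.Dict.empty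

-- A in the recursive calls: every element of `points` is then a Python tuple, so
-- `point in points` is ordinary tuple equality (= list equality here).
def evolveTupA (points : List (List Int)) (timesteps : Int) : List (List Int) :=
  if timesteps ≤ 0 then points
  else
    evolveTupA
      (((nearbyActiveA points).items.filter
          (fun pc => pc.2 == 3 || (points.contains pc.1 && pc.2 == 4))).map (·.1))
      (timesteps - 1)
  termination_by timesteps.toNat
  decreasing_by rename_i h; omega

-- Top-level call: the argument `points` is a Python LIST of LISTS (type convention), while the
-- dict keys `point` are tuples; in Python `tuple == list` is always False, so the membership
-- branch `point in points and nearby == 4` never fires on the initial call — ported literally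
-- as the filter `nearby == 3`.  From the first recursive call on, elements are tuples (evolveTupA).
def evolve (points : List (List Int)) (timesteps : Int) : List (List Int) :=
  if timesteps ≤ 0 then points
  else
    evolveTupA
      (((nearbyActiveA points).items.filter (fun pc => pc.2 == 3)).map (·.1))
      (timesteps - 1)

-- ===== PORT B =====
-- Source B's plain dict: counts[key] = counts.get(key, 0) + 1
def countsB (state : List (List Int)) : PySem.Dict (List Int) Int :=
  state.foldl
    (fun d point =>
      (pyOffsets point.length).foldl
        (fun d offset =>
          let key := List.zipWith (· + ·) point offset
          d.insert key (d.getD key 0 + 1)) d)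
    PySem.Dict.empty

-- one loop iteration after the first: state holds tuples, membership is plain equality
def stepB (state : List (List Int)) : List (List Int) :=
  ((countsB state).items.filter
      (fun pc => pc.2 == 3 || (state.contains pc.1 && pc.2 == 4))).map (·.1)

-- the FIRST loop iteration: state is the caller's list of lists, the dict keys are tuples,
-- so `point in state` is always False in Python — the filter is just `nearby == 3`
def stepBFirst (state : List (List Int)) : List (List Int) :=
  ((countsB state).items.filter (fun pc => pc.2 == 3)).map (·.1)

-- Source B: guard, then `for _ in range(timesteps)`; the first iteration is peeled because its
-- membership test differs (list vs tuple), the remaining timesteps-1 iterations are stepB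
def evolve_alt (points : List (List Int)) (timesteps : Int) : List (List Int) :=
  if timesteps ≤ 0 then points
  else (List.range (timesteps.toNat - 1)).foldl (fun s _ => stepB s) (stepBFirst points)

-- ===== PRECONDITION & SPEC =====
-- Pre_ excludes timesteps > 900: A recurses once per timestep, so large timestep counts hit
-- CPython's recursion limit (RecursionError; the exact threshold, near 1000, depends on the
-- caller's stack depth, hence the conservative bound — it also excludes some returning inputs).
def Pre_evolve (points : List (List Int)) (timesteps : Int) : Prop := timesteps ≤ 900
instance (points : List (List Int)) (timesteps : Int) : Decidable (Pre_evolve points timesteps) := by unfold Pre_evolve; infer_instance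
def pvWitness_evolve : List (List Int) × Int := ([[0, 0], [1, 0], [2, 0]], 2)

def Spec_evolve (points : List (List Int)) (timesteps : Int) (out : List (List Int)) : Prop := out = evolve_alt points timesteps
instance (points : List (List Int)) (timesteps : Int) (out : List (List Int)) : Decidable (Spec_evolve points timesteps out) := by unfold Spec_evolve; infer_instance

-- ===== CLAIM (what is proved, stated in full; the proofs are below) =====
def Claim_equal_evolve : Prop := ∀ (points : List (List Int)) (timesteps : Int), Dom_evolve points timesteps → Pre_evolve points timesteps → Spec_evolve points timesteps (evolve points timesteps)

-- ===== LEMMAS AND PROOFS =====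

-- (defaultdict increment and dict.get(k,0)+1 insertion build definitionally the same dict,
-- so stepB is definitionally A's per-step body; the induction below uses that.)
theorem evolveTupA_eq_foldl : ∀ (n : Nat) (t : Int), t.toNat = n → ∀ s,
    evolveTupA s t = (List.range n).foldl (fun a _ => stepB a) s := by
  intro n
  induction n with
  | zero =>
      intro t ht s
      rw [evolveTupA]
      simp [show t ≤ 0 by omega]
  | succ n ih =>
      intro t ht s
      rw [evolveTupA]
      rw [if_neg (by omega)]
      rw [List.range_succ_eq_map, List.foldl_cons, List.foldl_map]
      exact ih (t - 1) (by omega) _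

theorem evolve_spec_aux (points : List (List Int)) (timesteps : Int) :
    evolve points timesteps = evolve_alt points timesteps := by
  unfold evolve evolve_alt
  by_cases h : timesteps ≤ 0
  · simp [h]
  · rw [if_neg h, if_neg h]
    exact evolveTupA_eq_foldl (timesteps.toNat - 1) (timesteps - 1) (by omega) _

-- ===== VERDICT (by name: the statement is the Claim_ definition above) =====
theorem evolve_spec : Claim_equal_evolve := by
  intro points timesteps _ _
  unfold Spec_evolve
  exact evolve_spec_aux points timesteps
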